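-- pv_equiv track=rewrite | github.com/oliverjones-w/OL_LLM_Intergration | DB Categorization with Context.py | parse_extracted_text
-- ===== SOURCE A (Python) =====
-- def parse_extracted_text(extracted_text):
--     categories = ["Firm", "Name", "Title", "Region", "Location", "Function", "Strategy", "Products"]
--     data = {}
--     for category in categories:
--         data[category] = ""
--         for line in extracted_text.split("\n"):
--             if line.startswith(category):
--                 data[category] = line.split(":")[1].strip()
--     return data
-- ===== SOURCE B (Python) =====
-- def parse_extracted_text(extracted_text):
--     categories = ["Firm", "Name", "Title", "Region", "Location", "Function", "Strategy", "Products"]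
--     # Classify each line once: the category names are prefix-free, so a line
--     # starts with at most one of them; later lines overwrite earlier matches.
--     found = {}
--     for line in extracted_text.split("\n"):
--         category = next((c for c in categories if line.startswith(c)), None)
--         if category is not None:
--             found[category] = line.split(":")[1].strip()
--     return {c: found.get(c, "") for c in categories}
-- ===== Notes on version B (the rewrite author's own statement) =====
-- stated objective: alternative
-- what changed: Instead of A's category-major nested loops that rescan all lines once per category while mutating the dict, B makes a single line-major pass that classifies each line by its unique matching prefix (the category names are prefix-free) into a lookup table, then assembles the result from that table with a default of "".
import Mathlib
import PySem

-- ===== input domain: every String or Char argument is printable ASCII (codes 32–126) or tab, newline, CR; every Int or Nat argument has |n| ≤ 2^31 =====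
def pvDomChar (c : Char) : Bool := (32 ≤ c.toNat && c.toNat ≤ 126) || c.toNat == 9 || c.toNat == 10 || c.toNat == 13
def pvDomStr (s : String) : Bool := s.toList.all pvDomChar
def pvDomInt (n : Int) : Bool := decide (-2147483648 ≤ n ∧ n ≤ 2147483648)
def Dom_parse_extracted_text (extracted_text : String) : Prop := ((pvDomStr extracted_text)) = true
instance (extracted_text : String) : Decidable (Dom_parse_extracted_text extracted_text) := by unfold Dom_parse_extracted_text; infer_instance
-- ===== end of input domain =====

-- B replaces A's category-major nested loops over a mutated dict with a single
-- line-major pass that classifies each line by its unique matching prefix into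
-- a lookup table, then assembles the result; objective: alternative algorithm.

-- ===== PORT A =====
-- s.split(sep) with a non-empty literal sep: split? is none only for sep = "".
def pvSplit (s sep : String) : List String := (PySem.Str.split? s sep).getD []

-- line.split(":")[1].strip(); Python raises IndexError when no ":" is present
-- (PySem.List.pyGet? returns none there; those inputs are excluded by Pre_).
def pvValA (line : String) : String :=
  PySem.Str.strip ((PySem.List.pyGet? (pvSplit line ":") 1).getD "")

def pvCatsA : List String :=
  ["Firm", "Name", "Title", "Region", "Location", "Function", "Strategy", "Products"]

def parse_extracted_text (extracted_text : String) : List (String × String) :=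
  (pvCatsA.foldl
    (fun d category =>
      (pvSplit extracted_text "\n").foldl
        (fun d' line =>
          if PySem.Str.startswith line category then d'.insert category (pvValA line) else d')
        (d.insert category ""))
    (PySem.Dict.empty : PySem.Dict String String)).items

-- ===== PORT B =====
def pvValB (line : String) : String :=
  PySem.Str.strip ((PySem.List.pyGet? (pvSplit line ":") 1).getD "")

def pvCatsB : List String :=
  ["Firm", "Name", "Title", "Region", "Location", "Function", "Strategy", "Products"]

-- 'next((c for c in categories if line.startswith(c)), None)' = find?;
-- the 'for line in …' loop building 'found' is the foldl.
def pvFoundB (lines : List String) : PySem.Dict String String :=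
  lines.foldl
    (fun d line =>
      match pvCatsB.find? (fun c => PySem.Str.startswith line c) with
      | some c => d.insert c (pvValB line)
      | none => d)
    PySem.Dict.empty

def parse_extracted_text_alt (extracted_text : String) : List (String × String) :=
  pvCatsB.map
    (fun c => (c, (pvFoundB (pvSplit extracted_text "\n")).getD c ""))

-- ===== PRECONDITION & SPEC =====
-- Pre_ excludes exactly the inputs where Python A raises IndexError: a line that
-- starts with one of the categories but contains no ":".
def Pre_parse_extracted_text (extracted_text : String) : Prop :=
  ∀ line ∈ pvSplit extracted_text "\n",
    (∃ c ∈ ["Firm", "Name", "Title", "Region", "Location", "Function", "Strategy", "Products"],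
        PySem.Str.startswith line c = true) →
      PySem.Str.isIn ":" line = true
instance (extracted_text : String) : Decidable (Pre_parse_extracted_text extracted_text) := by
  unfold Pre_parse_extracted_text; infer_instance

def pvWitness_parse_extracted_text : String := "Firm: Acme\nName: Bob\nJunk"

def Spec_parse_extracted_text (extracted_text : String) (out : List (String × String)) : Prop := out = parse_extracted_text_alt extracted_text
instance (extracted_text : String) (out : List (String × String)) : Decidable (Spec_parse_extracted_text extracted_text out) := by unfold Spec_parse_extracted_text; infer_instance

-- ===== CLAIM (what is proved, stated in full; the proofs are below) =====
def Claim_equal_parse_extracted_text : Prop := ∀ (extracted_text : String), Dom_parse_extracted_text extracted_text → Pre_parse_extracted_text extracted_text → Spec_parse_extracted_text extracted_text (parse_extracted_text extracted_text)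

-- ===== LEMMAS AND PROOFS =====

-- proof-only abbreviation: value A's inner loop leaves for one category
def pvLastA (lines : List String) (c : String) : String :=
  match lines.reverse.find? (fun line => PySem.Str.startswith line c) with
  | some l => pvValA l
  | none => ""

-- the category names are pairwise non-prefixes of one another
theorem pv_cats_prefix_free :
    ∀ c1 ∈ pvCatsA, ∀ c2 ∈ pvCatsA, c1 ≠ c2 → ¬ c1.toList <+: c2.toList := by decide

-- a line starts with at most one category
theorem pv_unique_match (l : String) (c1 c2 : String)
    (h1 : c1 ∈ pvCatsA) (h2 : c2 ∈ pvCatsA)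
    (s1 : PySem.Str.startswith l c1 = true) (s2 : PySem.Str.startswith l c2 = true) :
    c1 = c2 := by
  by_contra hne
  have p1 : c1.toList <+: l.toList :=
    (PySem.Chars.startswith_iff _ _).mp (by simpa using s1)
  have p2 : c2.toList <+: l.toList :=
    (PySem.Chars.startswith_iff _ _).mp (by simpa using s2)
  rcases List.prefix_or_prefix_of_prefix p1 p2 with h | h
  · exact pv_cats_prefix_free c1 h1 c2 h2 hne h
  · exact pv_cats_prefix_free c2 h2 c1 h1 (Ne.symm hne) h

theorem pv_find_eq (l : String) (c : String) (hc : c ∈ pvCatsA)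
    (hs : PySem.Str.startswith l c = true) :
    pvCatsB.find? (fun c' => PySem.Str.startswith l c') = some c := by
  cases hf : pvCatsB.find? (fun c' => PySem.Str.startswith l c') with
  | none =>
    exact absurd hs (by simpa using (List.find?_eq_none.mp hf c hc))
  | some c' =>
    have hmem : c' ∈ pvCatsB := List.mem_of_find?_eq_some hf
    have hp : PySem.Str.startswith l c' = true := by
      simpa using List.find?_some hf
    exact congrArg some (pv_unique_match l c' c hmem hc hp hs)

-- A's inner loop only rewrites the entry at `category`.
theorem pv_inner_fold (ls : List String) (c : String)
    (d : PySem.Dict String String) (a : String) :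
    ls.foldl
      (fun d' line => if PySem.Str.startswith line c then d'.insert c (pvValA line) else d')
      (d.insert c a)
    = d.insert c
        (ls.foldl (fun v line => if PySem.Str.startswith line c then pvValA line else v) a) := by
  induction ls generalizing a with
  | nil => rfl
  | cons l ls ih =>
    simp only [List.foldl_cons]
    by_cases h : PySem.Str.startswith l c = true
    · rw [h] ; simp only [if_true, PySem.Dict.insert_insert_self] ; exact ih (pvValA l)
    · simp only [h] ; exact ih a

-- keep-last left fold = first match over the reversed list
theorem pv_last_fold (ls : List String) (c : String) (a : String) :
    ls.foldl (fun v line => if PySem.Str.startswith line c then pvValA line else v) a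
    = (match ls.reverse.find? (fun line => PySem.Str.startswith line c) with
       | some l => pvValA l
       | none => a) := by
  induction ls generalizing a with
  | nil => rfl
  | cons l ls ih =>
    simp only [List.foldl_cons, List.reverse_cons, List.find?_append]
    rw [ih]
    cases hf : ls.reverse.find? (fun line => PySem.Str.startswith line c) with
    | some l' => simp
    | none =>
      by_cases h : PySem.Str.startswith l c = true
      · have h' : PySem.Chars.startswith l.toList c.toList = true := by simpa using h
        simp [h']
      · have h' : ¬ PySem.Chars.startswith l.toList c.toList = true := by simpa using h
        simp [h']

-- B's classifying fold, read at one category, keeps the last matching line.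
theorem pv_found_fold (ls : List String) (c : String) (hc : c ∈ pvCatsA)
    (d : PySem.Dict String String) :
    (ls.foldl
      (fun d line =>
        match pvCatsB.find? (fun c' => PySem.Str.startswith line c') with
        | some c' => d.insert c' (pvValB line)
        | none => d)
      d).getD c ""
    = (match ls.reverse.find? (fun line => PySem.Str.startswith line c) with
       | some l => pvValB l
       | none => d.getD c "") := by
  induction ls generalizing d with
  | nil => rfl
  | cons l ls ih =>
    simp only [List.foldl_cons, List.reverse_cons, List.find?_append]
    rw [ih]
    cases hf : ls.reverse.find? (fun line => PySem.Str.startswith line c) with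
    | some l' => simp
    | none =>
      simp only [Option.none_or]
      by_cases h : PySem.Str.startswith l c = true
      · have h' : PySem.Chars.startswith l.toList c.toList = true := by simpa using h
        rw [pv_find_eq l c hc h]
        simp [h', PySem.Dict.getD_insert_self]
      · have h' : ¬ PySem.Chars.startswith l.toList c.toList = true := by simpa using h
        cases hm : pvCatsB.find? (fun c' => PySem.Str.startswith l c') with
        | none => simp [h']
        | some c' =>
          have hne : c ≠ c' := by
            intro heq
            exact h (by simpa [← heq] using List.find?_some hm)
          simp [h', PySem.Dict.getD_insert_of_ne _ _ _ hne]

-- ===== VERDICT (by name: the statement is the Claim_ definition above) =====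
theorem parse_extracted_text_spec : Claim_equal_parse_extracted_text := by
  intro t _hdom _hpre
  unfold Spec_parse_extracted_text parse_extracted_text parse_extracted_text_alt
  have hstep :
      (fun (d : PySem.Dict String String) (category : String) =>
        (pvSplit t "\n").foldl
          (fun d' line =>
            if PySem.Str.startswith line category then d'.insert category (pvValA line) else d')
          (d.insert category ""))
      = fun d category => d.insert category (pvLastA (pvSplit t "\n") category) := by
    funext d category
    rw [pv_inner_fold, pv_last_fold]
    rfl
  rw [pvCatsA, hstep,
    PySem.Dict.items_foldl_insert_fresh (k := fun c => c)
      (v := fun c => pvLastA (pvSplit t "\n") c)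
      (d := PySem.Dict.empty)
      (l := ["Firm", "Name", "Title", "Region", "Location", "Function", "Strategy", "Products"])
      (by intro a _; simp [PySem.Dict.contains_empty]) (by decide)]
  have hB : ∀ c ∈ pvCatsB,
      (pvFoundB (pvSplit t "\n")).getD c "" = pvLastA (pvSplit t "\n") c := by
    intro c hc
    have hc' : c ∈ pvCatsA := by rw [pvCatsB] at hc; rw [pvCatsA]; exact hc
    rw [pvFoundB, pv_found_fold _ _ hc']
    rw [pvLastA]
    cases (pvSplit t "\n").reverse.find? (fun line => PySem.Str.startswith line c) with
    | some l => rfl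
    | none => simp [PySem.Dict.getD_empty]
  have hemp : (PySem.Dict.empty : PySem.Dict String String).items = [] := rfl
  rw [hemp, List.nil_append, pvCatsB] at *
  exact (List.map_congr_left (fun c hc => by rw [hB c hc])).symm
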